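-- pv_equiv track=rewrite | github.com/H1drogen/Algorithms | HackerRank/Cisco.py | groupDivision
-- ===== SOURCE A (Python) =====
-- def groupDivision(levels, maxSpread):
--     levels.sort()
--     groups = []
--     for i in range(len(levels)):
--         if i == 0:
--             groups.append([levels[i]])
--         else:
--             if levels[i] - groups[-1][0] <= maxSpread:
--                 groups[-1].append(levels[i])
--             else:
--                 groups.append([levels[i]])
--     return len(groups)
-- ===== SOURCE B (Python) =====
-- def _bisect_right(a, x):
--     lo, hi = 0, len(a)
--     while lo < hi:
--         mid = (lo + hi) // 2
--         if x < a[mid]: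
--             hi = mid
--         else:
--             lo = mid + 1
--     return lo
--
--
-- def groupDivision(levels, maxSpread):
--     levels.sort()
--     n = len(levels)
--     count = 0
--     i = 0
--     while i < n:
--         count += 1
--         i = max(i + 1, _bisect_right(levels, levels[i] + maxSpread))
--     return count
-- ===== Notes on version B (the rewrite author's own statement) =====
-- stated objective: faster
-- what changed: After sorting, B no longer scans element by element maintaining group lists: it counts groups directly, binary-searching (bisect_right) for each group's end and jumping there, so the per-element pass and the groups list disappear.
import Mathlib
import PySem

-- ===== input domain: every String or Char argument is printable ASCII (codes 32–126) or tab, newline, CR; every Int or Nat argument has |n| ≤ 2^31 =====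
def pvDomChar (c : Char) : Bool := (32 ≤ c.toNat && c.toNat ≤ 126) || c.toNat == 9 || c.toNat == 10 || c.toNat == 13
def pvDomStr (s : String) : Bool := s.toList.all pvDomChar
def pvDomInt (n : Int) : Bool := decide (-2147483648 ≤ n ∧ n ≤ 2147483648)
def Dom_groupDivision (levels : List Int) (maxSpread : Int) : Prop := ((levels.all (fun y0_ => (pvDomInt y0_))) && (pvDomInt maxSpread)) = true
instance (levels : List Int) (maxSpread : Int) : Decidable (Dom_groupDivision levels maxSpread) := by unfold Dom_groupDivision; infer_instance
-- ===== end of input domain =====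

-- B replaces A's element-by-element scan (building group lists) by bisect-right jumps from
-- group anchor to group anchor after the sort; equivalence is about the RETURN value only
-- (both A and B sort the argument list in place).


-- ===== PORT A =====
-- the body of A's for-loop over i in range(len(levels)) (groups[-1][0] -> (getLastD []).headD 0)
def pvStepA (s : List Int) (maxSpread : Int) (groups : List (List Int)) (i : Int) : List (List Int) :=
  if i == 0 then
    groups ++ [[PySem.List.pyGetD s i 0]]
  else
    if PySem.List.pyGetD s i 0 - (groups.getLastD []).headD 0 ≤ maxSpread then
      groups.dropLast ++ [(groups.getLastD []) ++ [PySem.List.pyGetD s i 0]]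
    else
      groups ++ [[PySem.List.pyGetD s i 0]]

def groupDivision (levels : List Int) (maxSpread : Int) : Int :=
  (((PySem.List.pyRange 0 ((PySem.List.sorted levels id).length : Int)).foldl
      (pvStepA (PySem.List.sorted levels id) maxSpread) []).length : Int)

-- ===== PORT B =====
-- Source B's while-loop: count a group, jump i to max(i+1, bisect_right(levels, levels[i] + maxSpread));
-- Source B's hand-written _bisect_right is CPython's bisect_right = PySem.List.bisectRight (same lo/hi binary search)
def pvLoopB (s : List Int) (m : Int) (i : Nat) (count : Nat) : Nat :=
  if h : i < s.length then
    pvLoopB s m (max (i + 1) (PySem.List.bisectRight s (PySem.List.pyGetD s (i : Int) 0 + m))) (count + 1)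
  else count
termination_by s.length - i
decreasing_by
  have : i + 1 ≤ max (i + 1) (PySem.List.bisectRight s (PySem.List.pyGetD s (i : Int) 0 + m)) :=
    Nat.le_max_left _ _
  omega

def groupDivision_alt (levels : List Int) (maxSpread : Int) : Int :=
  ((pvLoopB (PySem.List.sorted levels id) maxSpread 0 0 : Nat) : Int)

-- ===== PRECONDITION & SPEC =====
def Spec_groupDivision (levels : List Int) (maxSpread : Int) (out : Int) : Prop := out = groupDivision_alt levels maxSpread
instance (levels : List Int) (maxSpread : Int) (out : Int) : Decidable (Spec_groupDivision levels maxSpread out) := by unfold Spec_groupDivision; infer_instance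

-- ===== CLAIM (what is proved, stated in full; the proofs are below) =====
def Claim_equal_groupDivision : Prop := ∀ (levels : List Int) (maxSpread : Int), Dom_groupDivision levels maxSpread → Spec_groupDivision levels maxSpread (groupDivision levels maxSpread)

-- ===== LEMMAS AND PROOFS =====

-- reference count of greedy groups on the (sorted) list: one group per anchor, the group's
-- members are the following elements within maxSpread of the anchor
def pvG (m : Int) : List Int → Nat
  | [] => 0
  | a :: t => 1 + pvG m (t.dropWhile (fun x => decide (x - a ≤ m)))
termination_by l => l.length
decreasing_by
  have := List.length_dropWhile_le (fun x => decide (x - a ≤ m)) t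
  simp only [List.length_cons]
  omega

-- A's scan after the first element, abstracted to (current anchor, remaining elements)
def pvScanA (m : Int) : Int → List Int → Nat
  | _, [] => 0
  | a, x :: t => if x - a ≤ m then pvScanA m a t else 1 + pvScanA m x t

lemma pvScanA_eq (m : Int) : ∀ (t : List Int) (a : Int),
    pvScanA m a t = pvG m (t.dropWhile (fun x => decide (x - a ≤ m))) := by
  intro t
  induction t with
  | nil => intro a; simp [pvScanA, pvG]
  | cons x t ih =>
    intro a
    by_cases h : x - a ≤ m
    · simp only [pvScanA, List.dropWhile_cons, decide_eq_true_eq]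
      rw [if_pos h, if_pos h, ih]
    · simp only [pvScanA, List.dropWhile_cons, decide_eq_true_eq]
      rw [if_neg h, if_neg h, pvG, ih]

-- A's fold over indices k..len, with groups = gs ++ [a :: r] (a = anchor of the last group),
-- adds pvScanA m a (s.drop k) further groups
lemma pvAloop (s : List Int) (m : Int) :
    ∀ (d k : Nat) (gs : List (List Int)) (a : Int) (r : List Int),
    s.length - k = d → 1 ≤ k →
    ((PySem.List.pyRange (k : Int) (s.length : Int)).foldl (pvStepA s m) (gs ++ [a :: r])).length
      = gs.length + 1 + pvScanA m a (s.drop k) := by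
  intro d
  induction d with
  | zero =>
    intro k gs a r hd _
    have hk : s.length ≤ k := by omega
    rw [show PySem.List.pyRange (k : Int) (s.length : Int) = [] by
      simp [PySem.List.pyRange]; omega]
    rw [List.drop_eq_nil_of_le hk]
    simp [pvScanA]
  | succ d ih =>
    intro k gs a r hd hk
    have hklt : k < s.length := by omega
    rw [PySem.List.pyRange_one_cons (by exact_mod_cast hklt), List.foldl_cons]
    have hx : PySem.List.pyGetD s (k : Int) 0 = s[k] := by
      rw [PySem.List.pyGetD_natCast, List.getD_eq_getElem s 0 hklt]
    have hk0 : ((k : Int) == 0) = false := by simp; omega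
    rw [List.drop_eq_getElem_cons hklt]
    by_cases h : s[k] - a ≤ m
    · have : pvStepA s m (gs ++ [a :: r]) (k : Int) = gs ++ [a :: (r ++ [s[k]])] := by
        simp only [pvStepA, hk0, Bool.false_eq_true, if_false, hx,
          List.getLastD_concat, List.dropLast_concat, List.headD_cons, if_pos h,
          List.cons_append]
      rw [this]
      have := ih (k + 1) gs a (r ++ [s[k]]) (by omega) (by omega)
      rw [show ((k : Int) + 1) = ((k + 1 : Nat) : Int) by push_cast; ring, this]
      simp [pvScanA, h]
    · have : pvStepA s m (gs ++ [a :: r]) (k : Int) = (gs ++ [a :: r]) ++ [s[k] :: []] := by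
        simp only [pvStepA, hk0, Bool.false_eq_true, if_false, hx,
          List.getLastD_concat, List.headD_cons, if_neg h]
      rw [this]
      have := ih (k + 1) (gs ++ [a :: r]) s[k] [] (by omega) (by omega)
      rw [show ((k : Int) + 1) = ((k + 1 : Nat) : Int) by push_cast; ring, this]
      simp [pvScanA, h, List.length_append]
      omega

-- A computes pvG on the sorted list
lemma pvA_eq (levels : List Int) (m : Int) :
    groupDivision levels m = (pvG m (PySem.List.sorted levels id) : Int) := by
  unfold groupDivision
  cases hs : PySem.List.sorted levels id with
  | nil => simp [PySem.List.pyRange, pvG]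
  | cons a t =>
    have hlen : (a :: t).length = t.length + 1 := rfl
    have h0 : (0 : Int) < ((a :: t).length : Int) := by simp
    rw [PySem.List.pyRange_one_cons h0, List.foldl_cons]
    have hstep : pvStepA (a :: t) m [] 0 = [] ++ [a :: []] := by
      simp [pvStepA]
    rw [hstep]
    rw [show ((0 : Int) + 1) = ((1 : Nat) : Int) by norm_num]
    rw [pvAloop (a :: t) m ((a :: t).length - 1) 1 [] a [] (by rfl) (by omega)]
    simp only [List.length_nil, List.drop_succ_cons, List.drop_zero, Nat.zero_add]
    rw [pvScanA_eq, pvG]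

-- a dropWhile whose cut point is characterised by indices is a drop
lemma pvDW (a m : Int) : ∀ (t : List Int) (j : Nat), j ≤ t.length →
    (∀ (k : Nat) (h : k < t.length), k < j → t[k] - a ≤ m) →
    (∀ (k : Nat) (h : k < t.length), j ≤ k → ¬ (t[k] - a ≤ m)) →
    t.dropWhile (fun x => decide (x - a ≤ m)) = t.drop j := by
  intro t
  induction t with
  | nil => intro j hj _ _; simp at hj; simp [hj]
  | cons y t ih =>
    intro j hj h1 h2
    cases j with
    | zero =>
      have hy := h2 0 (by simp) (by omega)
      simp only [List.getElem_cons_zero] at hy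
      have hdec : (decide (y - a ≤ m)) = false := by simpa using hy
      rw [List.dropWhile_cons, hdec]
      simp
    | succ j' =>
      have hy : y - a ≤ m := by
        have := h1 0 (by simp) (by omega)
        simpa using this
      have hdec : (decide (y - a ≤ m)) = true := by simpa using hy
      simp only [List.dropWhile_cons, hdec, if_true, List.drop_succ_cons]
      exact ih j' (by simpa using hj)
        (fun k hk hkj => by simpa using h1 (k + 1) (by simpa using hk) (by omega))
        (fun k hk hkj => by simpa using h2 (k + 1) (by simpa using hk) (by omega))

-- B's jump loop adds pvG of the remaining suffix
lemma pvBloop (s : List Int) (m : Int) (hs : List.Pairwise (fun x1 x2 => x1 ≤ x2) s) :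
    ∀ (d i c : Nat), s.length - i = d → pvLoopB s m i c = c + pvG m (s.drop i) := by
  intro d
  induction d using Nat.strong_induction_on with
  | _ d ih =>
    intro i c hd
    by_cases h : i < s.length
    · have hx : PySem.List.pyGetD s (i : Int) 0 = s[i] := by
        rw [PySem.List.pyGetD_natCast, List.getD_eq_getElem s 0 h]
      set j := PySem.List.bisectRight s (s[i] + m) with hj
      obtain ⟨hjle, hlt, hge⟩ := PySem.List.bisectRight_spec s (s[i] + m) hs
      set nx := max (i + 1) j with hnx
      have hstep : pvLoopB s m i c = pvLoopB s m nx (c + 1) := by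
        rw [pvLoopB, dif_pos h, hx]
      have hnxgt : i < nx := by have := Nat.le_max_left (i + 1) j; omega
      have hrec := ih (s.length - nx) (by omega) nx (c + 1) rfl
      -- the jump lands exactly after the current greedy group
      have hdrop : s.drop nx = (s.drop (i + 1)).dropWhile (fun x => decide (x - s[i] ≤ m)) := by
        have hjj : nx = (i + 1) + (j - (i + 1)) := by omega
        rw [pvDW s[i] m (s.drop (i + 1)) (j - (i + 1))
          (by simp [List.length_drop]; omega)
          (fun k hk hkj => by
            rw [List.getElem_drop]
            have hklen : i + 1 + k < s.length := by simp [List.length_drop] at hk; omega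
            have := hlt (i + 1 + k) hklen (by omega)
            omega)
          (fun k hk hkj => by
            rw [List.getElem_drop]
            have hklen : i + 1 + k < s.length := by simp [List.length_drop] at hk; omega
            have := hge (i + 1 + k) hklen (by omega)
            omega)]
        rw [List.drop_drop, hjj]
      rw [hstep, hrec, List.drop_eq_getElem_cons h, pvG, ← hdrop]
      omega
    · rw [pvLoopB, dif_neg h]
      rw [List.drop_eq_nil_of_le (by omega)]
      simp [pvG]

-- B computes pvG on the sorted list
lemma pvB_eq (levels : List Int) (m : Int) :
    groupDivision_alt levels m = (pvG m (PySem.List.sorted levels id) : Int) := by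
  unfold groupDivision_alt
  have hs : List.Pairwise (fun x1 x2 => x1 ≤ x2) (PySem.List.sorted levels id) := by
    simpa using PySem.List.sorted_pairwise levels id
  rw [pvBloop (PySem.List.sorted levels id) m hs (PySem.List.sorted levels id).length 0 0 rfl]
  simp

-- ===== VERDICT (by name: the statement is the Claim_ definition above) =====
theorem groupDivision_spec : Claim_equal_groupDivision := by
  intro levels maxSpread _
  unfold Spec_groupDivision
  rw [pvA_eq, pvB_eq]
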